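-- pv_equiv track=rewrite | github.com/James-Weatherill/AdventOfCode2023 | Day7/Day7Pt2.py | fiveOfAKind
-- ===== SOURCE A (Python) =====
-- def fiveOfAKind(inputHand):
--     tempSet = set()
--     for card in inputHand:
--         tempSet.add(card)
--     if len(tempSet)==1:
--         return True
--     else:
--         return False
-- ===== SOURCE B (Python) =====
-- def fiveOfAKind(inputHand):
--     return len(inputHand) > 0 and all(card == inputHand[0] for card in inputHand)
-- ===== Notes on version B (the rewrite author's own statement) =====
-- stated objective: idiomatic
-- what changed: B compares every card against the first card in one short-circuiting all() pass instead of accumulating a set of distinct cards and testing its size; it stops at the first mismatch and allocates no set.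
import Mathlib
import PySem

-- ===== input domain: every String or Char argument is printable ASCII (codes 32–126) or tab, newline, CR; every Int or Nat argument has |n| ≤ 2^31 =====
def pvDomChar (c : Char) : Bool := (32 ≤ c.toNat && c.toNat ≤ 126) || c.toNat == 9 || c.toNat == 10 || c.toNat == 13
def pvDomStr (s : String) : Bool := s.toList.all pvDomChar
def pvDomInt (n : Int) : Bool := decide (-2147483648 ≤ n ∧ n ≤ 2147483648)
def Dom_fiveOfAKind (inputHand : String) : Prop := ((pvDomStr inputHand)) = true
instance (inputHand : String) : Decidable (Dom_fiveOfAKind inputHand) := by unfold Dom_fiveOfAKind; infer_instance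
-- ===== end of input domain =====

-- B replaces A's distinct-card set accumulation by a single short-circuit comparison of every card
-- against the first card (objective: idiomatic).

-- ===== PORT A =====
-- A: build set of the cards, return True iff it has exactly one element.
def fiveOfAKind (inputHand : String) : Bool :=
  let tempSet : PySem.Set Char := inputHand.toList.foldl PySem.Set.add PySem.Set.empty
  if PySem.Set.len tempSet == 1 then true else false

-- ===== PORT B =====
-- B: nonempty and every card equals the first card.
def fiveOfAKind_alt (inputHand : String) : Bool :=
  match inputHand.toList with
  | [] => false
  | c :: _ => inputHand.toList.all (fun card => card == c)

-- ===== PRECONDITION & SPEC =====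
def Spec_fiveOfAKind (inputHand : String) (out : Bool) : Prop := out = fiveOfAKind_alt inputHand
instance (inputHand : String) (out : Bool) : Decidable (Spec_fiveOfAKind inputHand out) := by unfold Spec_fiveOfAKind; infer_instance

-- ===== CLAIM (what is proved, stated in full; the proofs are below) =====
def Claim_equal_fiveOfAKind : Prop := ∀ (inputHand : String), Dom_fiveOfAKind inputHand → Spec_fiveOfAKind inputHand (fiveOfAKind inputHand)

-- ===== LEMMAS AND PROOFS =====

-- two distinct members force length ≥ 2
theorem pv_two_mem_length {α : Type} {l : List α} {a b : α} (ha : a ∈ l) (hb : b ∈ l)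
    (hab : a ≠ b) : 2 ≤ l.length := by
  match l with
  | [] => cases ha
  | [x] =>
      simp at ha hb; exact absurd (ha.trans hb.symm) hab
  | x :: y :: r => simp [List.length]

-- a nodup list whose every member equals c and which contains c is exactly [c]
theorem pv_nodup_all_eq {l : List Char} {c : Char} (hnd : l.Nodup)
    (hc : c ∈ l) (hall : ∀ x ∈ l, x = c) : l.length = 1 := by
  match l with
  | [] => cases hc
  | [x] => rfl
  | x :: y :: r =>
      have hx := hall x (by simp)
      have hy := hall y (by simp)
      rw [List.nodup_cons] at hnd
      exact absurd (by simp [hx, hy] : x ∈ y :: r) hnd.1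

theorem fiveOfAKind_spec : Claim_equal_fiveOfAKind := by
  intro s _
  unfold Spec_fiveOfAKind fiveOfAKind fiveOfAKind_alt
  cases hs : s.toList with
  | nil => simp [hs, PySem.Set.len, PySem.Set.empty]
  | cons c t =>
      have hfold : (c :: t).foldl PySem.Set.add PySem.Set.empty = PySem.Set.ofList (c :: t) := by
        rfl
      simp only [hfold]
      by_cases hall : ∀ x ∈ c :: t, x = c
      · have h1 : (PySem.Set.ofList (c :: t)).length = 1 :=
          pv_nodup_all_eq (PySem.Set.nodup_ofList _)
            ((PySem.Set.mem_ofList _ _).mpr (by simp))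
            (fun x hx => hall x ((PySem.Set.mem_ofList _ _).mp hx))
        have h2 : (c :: t).all (fun card => card == c) = true := by
          simp only [List.all_eq_true]
          intro x hx; exact beq_iff_eq.mpr (hall x hx)
        simp [PySem.Set.len, h1, h2]
      · rw [not_forall] at hall
        simp only [not_forall, exists_prop] at hall
        obtain ⟨x, hx, hxc⟩ := hall
        have h2 : 2 ≤ (PySem.Set.ofList (c :: t)).length :=
          pv_two_mem_length ((PySem.Set.mem_ofList _ _).mpr hx)
            ((PySem.Set.mem_ofList _ _).mpr (by simp)) hxc
        have h3 : (c :: t).all (fun card => card == c) = false := by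
          simp only [List.all_eq_false]
          exact ⟨x, hx, by simp [hxc]⟩
        have h4 : PySem.Set.len (PySem.Set.ofList (c :: t)) ≠ 1 := by
          simp [PySem.Set.len]; omega
        simp [h3]; omega
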